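-- pv_equiv track=rewrite | github.com/981377660LMT/algorithm-study | 9_排序和搜索/二分/经典题/卷积最大值.py | convolutionChmax2
-- ===== SOURCE A (Python) =====
-- from itertools import accumulate
-- from typing import List
--
-- def convolutionChmax2(arr1: List[int], arr2: List[int], chMax: int) -> int:
--     arr1, arr2 = sorted(arr1, reverse=True), sorted(arr2)
--     presum2 = list(accumulate(arr2, initial=0))
--     res = 0
--     pos = 0
--     for v1 in arr1:
--         threshold = chMax - v1
--         while pos < len(arr2) and arr2[pos] <= threshold:
--             pos += 1
--         res += chMax * pos
--         if pos < len(arr2):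
--             remainingSum = presum2[-1] - presum2[pos]
--             remainingCount = len(arr2) - pos
--             res += remainingSum + v1 * remainingCount
--     return res
-- ===== SOURCE B (Python) =====
-- from typing import List
--
-- def convolutionChmax2(arr1: List[int], arr2: List[int], chMax: int) -> int:
--     res = 0
--     for v1 in arr1:
--         for v2 in arr2:
--             res += max(chMax, v1 + v2)
--     return res
-- ===== Notes on version B (the rewrite author's own statement) =====
-- stated objective: simpler
-- what changed: B replaces A's sort-both-arrays + prefix-sum + monotone two-pointer pass by the direct nested-loop sum of max(chMax, v1+v2) over all pairs.
import Mathlib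
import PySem

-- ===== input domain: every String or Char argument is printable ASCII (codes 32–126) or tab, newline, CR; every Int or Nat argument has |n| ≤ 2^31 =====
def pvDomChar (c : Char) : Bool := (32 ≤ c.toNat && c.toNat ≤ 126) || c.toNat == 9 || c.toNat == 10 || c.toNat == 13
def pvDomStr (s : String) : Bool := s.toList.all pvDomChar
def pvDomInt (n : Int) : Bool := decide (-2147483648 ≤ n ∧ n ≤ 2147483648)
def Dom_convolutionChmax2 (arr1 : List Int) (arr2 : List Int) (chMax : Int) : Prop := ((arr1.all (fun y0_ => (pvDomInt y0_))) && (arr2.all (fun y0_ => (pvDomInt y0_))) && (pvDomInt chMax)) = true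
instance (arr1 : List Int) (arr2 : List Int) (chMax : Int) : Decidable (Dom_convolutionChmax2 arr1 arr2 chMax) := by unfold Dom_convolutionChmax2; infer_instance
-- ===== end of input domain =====

-- B replaces A's sort + prefix-sum + two-pointer pass by the direct nested-loop sum of max(chMax, v1+v2) over all pairs (simpler, not faster).

-- ===== PORT A =====
-- 'while pos < len(arr2) and arr2[pos] <= threshold: pos += 1'
def pvAdvance (l : List Int) (thr : Int) (pos : Nat) : Nat :=
  if pos < l.length ∧ l.getD pos 0 ≤ thr then pvAdvance l thr (pos + 1) else pos
termination_by l.length - pos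
decreasing_by omega

-- the body of 'for v1 in arr1' acting on the state (res, pos)
def pvStep (s2 : List Int) (presum2 : List Int) (chMax : Int) (st : Int × Nat) (v1 : Int) : Int × Nat :=
  let threshold := chMax - v1
  let pos := pvAdvance s2 threshold st.2
  let res := st.1 + chMax * (pos : Int)
  let res :=
    if pos < s2.length then
      -- presum2[-1]; presum2 is nonempty so pyGet? always returns a value and getD never pads
      let remainingSum := (PySem.List.pyGet? presum2 (-1)).getD 0 - presum2.getD pos 0
      let remainingCount : Int := (s2.length : Int) - (pos : Int)
      res + (remainingSum + v1 * remainingCount)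
    else res
  (res, pos)

def convolutionChmax2 (arr1 : List Int) (arr2 : List Int) (chMax : Int) : Int :=
  let s1 := PySem.List.sorted arr1 (fun x => x) true
  let s2 := PySem.List.sorted arr2 (fun x => x) false
  -- presum2 = list(accumulate(arr2, initial=0))
  let presum2 := List.scanl (· + ·) 0 s2
  (s1.foldl (pvStep s2 presum2 chMax) (0, 0)).1

-- ===== PORT B =====
def convolutionChmax2_alt (arr1 : List Int) (arr2 : List Int) (chMax : Int) : Int :=
  arr1.foldl (fun res v1 => arr2.foldl (fun r v2 => r + max chMax (v1 + v2)) res) 0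

-- ===== PRECONDITION & SPEC =====
def Spec_convolutionChmax2 (arr1 : List Int) (arr2 : List Int) (chMax : Int) (out : Int) : Prop := out = convolutionChmax2_alt arr1 arr2 chMax
instance (arr1 : List Int) (arr2 : List Int) (chMax : Int) (out : Int) : Decidable (Spec_convolutionChmax2 arr1 arr2 chMax out) := by unfold Spec_convolutionChmax2; infer_instance

-- ===== CLAIM =====
def Claim_equal_convolutionChmax2 : Prop := ∀ (arr1 : List Int) (arr2 : List Int) (chMax : Int), Dom_convolutionChmax2 arr1 arr2 chMax → Spec_convolutionChmax2 arr1 arr2 chMax (convolutionChmax2 arr1 arr2 chMax)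

-- ===== LEMMAS AND PROOFS =====

-- number of leading elements ≤ thr
def pvCnt (l : List Int) (thr : Int) : Nat := (l.takeWhile (fun x => decide (x ≤ thr))).length

lemma pvCnt_le_length (l : List Int) (thr : Int) : pvCnt l thr ≤ l.length := by
  simpa [pvCnt] using (List.takeWhile_prefix (p := fun x => decide (x ≤ thr)) (l := l)).length_le

lemma pvCnt_cons (a : Int) (t : List Int) (thr : Int) :
    pvCnt (a :: t) thr = if a ≤ thr then pvCnt t thr + 1 else 0 := by
  by_cases ha : a ≤ thr <;> simp [pvCnt, ha]

lemma pvCnt_mono (l : List Int) {thr thr' : Int} (h : thr ≤ thr') : pvCnt l thr ≤ pvCnt l thr' := by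
  induction l with
  | nil => simp [pvCnt]
  | cons a t ih =>
    by_cases ha : a ≤ thr
    · simp [pvCnt, ha, le_trans ha h] at *
      omega
    · simp [pvCnt, ha]

lemma pvAdvance_eq_aux (l : List Int) (thr : Int) :
    ∀ (n pos : Nat), l.length - pos ≤ n → pvAdvance l thr pos = pos + pvCnt (l.drop pos) thr := by
  intro n
  induction n with
  | zero =>
    intro pos h
    rw [pvAdvance]
    have hlen : l.length ≤ pos := by omega
    simp [Nat.not_lt.mpr hlen, List.drop_eq_nil_of_le hlen, pvCnt]
  | succ n ih =>
    intro pos h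
    rw [pvAdvance]
    by_cases hp : pos < l.length
    · have hdrop : l.drop pos = l[pos] :: l.drop (pos + 1) := List.drop_eq_getElem_cons hp
      have hgd : l.getD pos 0 = l[pos] := List.getD_eq_getElem l 0 hp
      by_cases hle : l[pos] ≤ thr
      · rw [if_pos ⟨hp, by rw [hgd]; exact hle⟩, ih (pos + 1) (by omega), hdrop,
          pvCnt_cons, if_pos hle]
        omega
      · rw [if_neg (by rw [hgd]; tauto), hdrop, pvCnt_cons, if_neg hle]
        omega
    · rw [if_neg (by tauto)]
      have hlen : l.length ≤ pos := by omega
      simp [List.drop_eq_nil_of_le hlen, pvCnt]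

lemma pvAdvance_eq (l : List Int) (thr : Int) (pos : Nat) :
    pvAdvance l thr pos = pos + pvCnt (l.drop pos) thr :=
  pvAdvance_eq_aux l thr (l.length - pos) pos le_rfl

lemma takeWhile_append_of_all {α : Type} (p : α → Bool) (a b : List α) (h : ∀ x ∈ a, p x = true) :
    (a ++ b).takeWhile p = a ++ b.takeWhile p := by
  induction a with
  | nil => simp
  | cons x t ih =>
    simp only [List.cons_append, List.takeWhile_cons, h x (by simp)]
    simp [ih (fun y hy => h y (by simp [hy]))]

lemma take_sat_of_le_pvCnt (l : List Int) (thr : Int) (pos : Nat) (h : pos ≤ pvCnt l thr) :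
    ∀ x ∈ l.take pos, x ≤ thr := by
  intro x hx
  obtain ⟨t, ht⟩ := (List.takeWhile_prefix (p := fun x => decide (x ≤ thr)) (l := l))
  have : l.take pos = (l.takeWhile (fun x => decide (x ≤ thr))).take pos := by
    conv_lhs => rw [← ht]
    rw [List.take_append_of_le_length h]
  rw [this] at hx
  have := List.mem_takeWhile_imp (List.mem_of_mem_take hx)
  simpa using this

lemma pvCnt_drop (l : List Int) (thr : Int) (pos : Nat) (h : pos ≤ pvCnt l thr) :
    pos + pvCnt (l.drop pos) thr = pvCnt l thr := by
  have hlen : pos ≤ l.length := le_trans h (pvCnt_le_length l thr)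
  conv_rhs => rw [show l = l.take pos ++ l.drop pos from (List.take_append_drop pos l).symm]
  unfold pvCnt
  rw [takeWhile_append_of_all _ _ _ (fun x hx => by simpa using take_sat_of_le_pvCnt l thr pos h x hx)]
  simp [List.length_take, Nat.min_eq_left hlen]

-- sum of max(chMax, v1+v2) when every element exceeds the threshold
lemma pvSum_all_gt (l : List Int) (chMax v1 : Int) (h : ∀ x ∈ l, chMax - v1 < x) :
    (l.map (fun v2 => max chMax (v1 + v2))).sum = v1 * (l.length : Int) + l.sum := by
  induction l with
  | nil => simp
  | cons a t ih =>
    have ha : max chMax (v1 + a) = v1 + a := max_eq_right (by have := h a (by simp); omega)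
    rw [List.map_cons, List.sum_cons, ha, ih (fun x hx => h x (by simp [hx])),
      List.sum_cons, List.length_cons]
    push_cast
    ring

-- characterisation of one iteration's contribution on an ascending list
lemma pvSum_split (l : List Int) (chMax v1 : Int) (hl : l.Pairwise (· ≤ ·)) :
    (l.map (fun v2 => max chMax (v1 + v2))).sum =
      chMax * (pvCnt l (chMax - v1) : Int) +
        (v1 * ((l.length : Int) - (pvCnt l (chMax - v1) : Int)) + (l.drop (pvCnt l (chMax - v1))).sum) := by
  induction l with
  | nil => simp [pvCnt]
  | cons a t ih =>
    rcases List.pairwise_cons.mp hl with ⟨hat, ht⟩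
    by_cases ha : a ≤ chMax - v1
    · have hcnt : pvCnt (a :: t) (chMax - v1) = pvCnt t (chMax - v1) + 1 := by
        simp [pvCnt, ha]
      have hmax : max chMax (v1 + a) = chMax := max_eq_left (by omega)
      rw [List.map_cons, List.sum_cons, hmax, ih ht, hcnt]
      simp only [List.drop_succ_cons, List.length_cons]
      push_cast
      ring
    · have hcnt : pvCnt (a :: t) (chMax - v1) = 0 := by
        simp [pvCnt, ha]
      rw [hcnt, pvSum_all_gt (a :: t) chMax v1 (by
        intro x hx
        rcases List.mem_cons.mp hx with rfl | hx
        · omega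
        · have := hat x hx; omega)]
      simp

lemma scanl_getD (l : List Int) (a : Int) (i : Nat) (h : i ≤ l.length) :
    (List.scanl (· + ·) a l).getD i 0 = a + (l.take i).sum := by
  induction l generalizing a i with
  | nil =>
    cases i with
    | zero => simp
    | succ j => simp at h
  | cons x t ih =>
    cases i with
    | zero => simp [List.scanl_cons]
    | succ j =>
      rw [List.scanl_cons, List.getD_cons_succ, List.take_succ_cons, List.sum_cons,
        ih (a + x) j (by simpa using h)]
      ring

lemma scanl_getLast? (l : List Int) (a : Int) :
    (List.scanl (· + ·) a l).getLast? = some (a + l.sum) := by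
  induction l generalizing a with
  | nil => simp
  | cons x t ih =>
    rw [List.scanl_cons, List.sum_cons, List.getLast?_cons, ih (a + x)]
    simp
    ring

-- one iteration of A's loop, given the invariant pos₀ ≤ pvCnt s2 (chMax - v1)
lemma pvStep_eq (s2 : List Int) (chMax v1 res₀ : Int) (pos₀ : Nat)
    (hs2 : s2.Pairwise (· ≤ ·)) (hpos : pos₀ ≤ pvCnt s2 (chMax - v1)) :
    pvStep s2 (List.scanl (· + ·) 0 s2) chMax (res₀, pos₀) v1 =
      (res₀ + (s2.map (fun v2 => max chMax (v1 + v2))).sum, pvCnt s2 (chMax - v1)) := by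
  have hadv : pvAdvance s2 (chMax - v1) pos₀ = pvCnt s2 (chMax - v1) := by
    rw [pvAdvance_eq, pvCnt_drop s2 (chMax - v1) pos₀ hpos]
  set c := pvCnt s2 (chMax - v1) with hc
  have hcle : c ≤ s2.length := pvCnt_le_length s2 (chMax - v1)
  have hsplit := pvSum_split s2 chMax v1 hs2
  rw [← hc] at hsplit
  unfold pvStep
  simp only [hadv]
  by_cases hlt : c < s2.length
  · rw [if_pos hlt]
    have hlast : (PySem.List.pyGet? (List.scanl (· + ·) 0 s2) (-1)).getD 0 = s2.sum := by
      rw [PySem.List.pyGet?_neg_one, scanl_getLast? s2 0]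
      simp
    have hgetD : (List.scanl (· + ·) 0 s2).getD c 0 = (s2.take c).sum := by
      rw [scanl_getD s2 0 c hcle]; simp
    have hsum : s2.sum = (s2.take c).sum + (s2.drop c).sum := by
      conv_lhs => rw [← List.take_append_drop c s2]
      rw [List.sum_append]
    rw [hlast, hgetD, hsplit]
    simp only [Prod.mk.injEq]
    exact ⟨by rw [hsum]; ring, trivial⟩
  · rw [if_neg hlt]
    have hceq : c = s2.length := by omega
    have hdrop : s2.drop c = [] := by rw [hceq]; simp
    rw [hsplit, hdrop]
    simp only [Prod.mk.injEq, List.sum_nil]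
    exact ⟨by rw [hceq]; ring, trivial⟩

-- the whole loop over a descending s1
lemma pvFold_eq (s1 : List Int) (s2 : List Int) (chMax : Int) :
    ∀ (res₀ : Int) (pos₀ : Nat),
      s2.Pairwise (· ≤ ·) → s1.Pairwise (fun a b => b ≤ a) →
      (∀ v ∈ s1, pos₀ ≤ pvCnt s2 (chMax - v)) →
      (s1.foldl (pvStep s2 (List.scanl (· + ·) 0 s2) chMax) (res₀, pos₀)).1 =
        res₀ + (s1.map (fun v1 => (s2.map (fun v2 => max chMax (v1 + v2))).sum)).sum := by
  induction s1 with
  | nil => intro res₀ pos₀ _ _ _; simp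
  | cons v t ih =>
    intro res₀ pos₀ hs2 hs1 hpos
    rcases List.pairwise_cons.mp hs1 with ⟨hvt, ht⟩
    rw [List.foldl_cons, pvStep_eq s2 chMax v res₀ pos₀ hs2 (hpos v (by simp))]
    rw [ih _ _ hs2 ht (fun w hw => le_trans le_rfl (pvCnt_mono s2 (by have := hvt w hw; omega)))]
    simp only [List.map_cons, List.sum_cons]
    ring

lemma alt_eq_sum (arr1 arr2 : List Int) (chMax : Int) :
    convolutionChmax2_alt arr1 arr2 chMax =
      (arr1.map (fun v1 => (arr2.map (fun v2 => max chMax (v1 + v2))).sum)).sum := by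
  unfold convolutionChmax2_alt
  have inner : ∀ (v1 r : Int), arr2.foldl (fun r v2 => r + max chMax (v1 + v2)) r =
      r + (arr2.map (fun v2 => max chMax (v1 + v2))).sum := by
    intro v1 r
    exact PySem.List.foldl_add (l := arr2) (a := r) (g := fun v2 => max chMax (v1 + v2))
  induction arr1 generalizing chMax with
  | nil => simp
  | cons v t ih =>
    have step : ∀ (r : Int) (l : List Int),
        l.foldl (fun res v1 => arr2.foldl (fun r v2 => r + max chMax (v1 + v2)) res) r =
          r + (l.map (fun v1 => (arr2.map (fun v2 => max chMax (v1 + v2))).sum)).sum := by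
      intro r l
      induction l generalizing r with
      | nil => simp
      | cons w s ihl =>
        rw [List.foldl_cons, inner w r, ihl]
        simp only [List.map_cons, List.sum_cons]
        ring
    rw [step]
    simp

-- ===== VERDICT =====
theorem convolutionChmax2_spec : Claim_equal_convolutionChmax2 := by
  intro arr1 arr2 chMax _
  unfold Spec_convolutionChmax2 convolutionChmax2
  simp only []
  rw [pvFold_eq (PySem.List.sorted arr1 (fun x => x) true) (PySem.List.sorted arr2 (fun x => x) false) chMax 0 0
        (by simpa using PySem.List.sorted_pairwise (xs := arr2) (key := fun x => x))
        (by simpa using PySem.List.sorted_pairwise_rev (xs := arr1) (key := fun x => x))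
        (fun v _ => Nat.zero_le _)]
  rw [alt_eq_sum]
  have h2 : ∀ v1 : Int,
      ((PySem.List.sorted arr2 (fun x => x) false).map (fun v2 => max chMax (v1 + v2))).sum =
        (arr2.map (fun v2 => max chMax (v1 + v2))).sum :=
    fun v1 => ((PySem.List.sorted_perm (xs := arr2) (key := fun x => x) (rev := false)).map _).sum_eq
  have h1 : ((PySem.List.sorted arr1 (fun x => x) true).map
        (fun v1 => (arr2.map (fun v2 => max chMax (v1 + v2))).sum)).sum =
      (arr1.map (fun v1 => (arr2.map (fun v2 => max chMax (v1 + v2))).sum)).sum :=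
    ((PySem.List.sorted_perm (xs := arr1) (key := fun x => x) (rev := true)).map _).sum_eq
  simp only [h2, h1]
  ring
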